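-- pv_equiv track=rewrite | github.com/robert-haas/alogos | alogos/systems/_shared/init_tree.py | _filter_rules_for_grow
-- ===== SOURCE A (Python) =====
-- def _filter_rules_for_grow(nt, rules, current_depth, max_depth, min_depths):
--     """Filter rules depending on current tree depth and min remaining depth required by each rule.
--
--     References
--     ----------
--     - 2017, Nicolau: `Understanding grammatical evolution:
--       initialisation <https://doi.org/10.1007/s10710-017-9309-9>`__
--
--         - "only productions whose minimum depths lead to a branch depth
--           less than or equal to the (ramped) maximum depth specified
--           are chosen"
--
--         - "SI can occasionally generate deeper trees than requested,
--           when non-recursive productions exist that require deeper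
--           sub-trees to terminate than recursive productions. Thus the
--           specified maximum derivation tree depth is a soft constraint."
--
--     """
--     # Try to choose rules that do not lead the tree to grow beyond max_depth
--     depths_per_rule = min_depths[nt]
--     used_rules = []
--     for rule, rule_depth in zip(rules, depths_per_rule):
--         if (current_depth + rule_depth) <= max_depth:
--             used_rules.append(rule)
--     # If not possible, choose those rules that share the lowest depth
--     if not used_rules:
--         min_depth = min(depths_per_rule)
--         used_rules = [r for r, s in zip(rules, depths_per_rule) if s == min_depth]
--     return used_rules
-- ===== SOURCE B (Python) =====
-- def _filter_rules_for_grow(nt, rules, current_depth, max_depth, min_depths):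
--     """Single pass over the paired (rule, depth) list: collect the rules that fit
--     within max_depth and simultaneously track the minimum depth seen together
--     with the rules achieving it, so no second pass is needed for the fallback."""
--     used = []
--     best = None
--     best_rules = []
--     for rule, depth in zip(rules, min_depths[nt]):
--         if current_depth + depth <= max_depth:
--             used.append(rule)
--         if best is None or depth < best:
--             best = depth
--             best_rules = [rule]
--         elif depth == best:
--             best_rules.append(rule)
--     return used if used else best_rules
-- ===== Notes on version B (the rewrite author's own statement) =====
-- stated objective: alternative
-- what changed: B replaces A's filter loop plus separate min() pass and fallback comprehension by one pass over the zipped (rule, depth) pairs that simultaneously collects fitting rules and tracks the running minimum depth with the rules achieving it; Pre_ excludes inputs where A raises (nt missing from min_depths, or an empty depth list making min([]) raise).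
-- intended difference: When the depth list is longer than the rule list, no rule fits the depth budget, and the overall minimum depth occurs only past the zip truncation, A returns [] (its fallback filters against a minimum no paired rule attains) while B returns the rules with the smallest paired depth, which is the intended nonempty fallback of 'choose the rules sharing the lowest depth'. — e.g. on _filter_rules_for_grow("S", [5], 0, 0, [("S", [2, 1])]): A returns [], B returns [5]
import Mathlib
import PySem

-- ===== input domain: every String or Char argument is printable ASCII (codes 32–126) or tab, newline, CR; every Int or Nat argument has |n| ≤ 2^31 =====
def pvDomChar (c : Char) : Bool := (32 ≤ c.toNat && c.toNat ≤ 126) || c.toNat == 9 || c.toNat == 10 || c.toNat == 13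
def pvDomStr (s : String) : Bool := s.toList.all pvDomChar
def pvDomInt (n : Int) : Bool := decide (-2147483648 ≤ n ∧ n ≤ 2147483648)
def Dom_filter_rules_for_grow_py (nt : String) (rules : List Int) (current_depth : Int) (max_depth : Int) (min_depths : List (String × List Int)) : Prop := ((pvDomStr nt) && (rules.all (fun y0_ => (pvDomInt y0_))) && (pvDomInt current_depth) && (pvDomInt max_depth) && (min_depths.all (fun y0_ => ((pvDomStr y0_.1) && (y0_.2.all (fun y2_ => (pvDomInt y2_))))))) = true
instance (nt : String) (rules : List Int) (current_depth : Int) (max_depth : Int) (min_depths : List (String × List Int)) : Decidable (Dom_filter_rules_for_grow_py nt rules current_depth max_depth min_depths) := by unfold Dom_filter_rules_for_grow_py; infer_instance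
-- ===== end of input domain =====

-- B merges A's filter loop, the min() pass and the fallback comprehension into one pass over the
-- zipped (rule, depth) pairs that also tracks the running minimum depth and the rules achieving it
-- (objective: alternative single-pass decomposition, same asymptotic cost).

-- ===== PORT A =====
-- min_depths[nt]  (dict lookup = first match in the association list; none = KeyError, excluded by Pre_)
def pvLookupDepths (min_depths : List (String × List Int)) (nt : String) : Option (List Int) :=
  (min_depths.find? (fun p => p.1 == nt)).map (·.2)

def filter_rules_for_grow_py (nt : String) (rules : List Int) (current_depth : Int) (max_depth : Int) (min_depths : List (String × List Int)) : List Int :=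
  let depths_per_rule := (pvLookupDepths min_depths nt).getD []
  let used_rules := (List.zip rules depths_per_rule).foldl
    (fun acc p => if current_depth + p.2 ≤ max_depth then acc ++ [p.1] else acc) []
  if used_rules = [] then
    -- min(depths_per_rule); Pre_ excludes the empty list (ValueError)
    let min_depth := ((PySem.List.min? depths_per_rule (fun x => x)).getD 0)
    (List.zip rules depths_per_rule).foldl
      (fun acc p => if p.2 = min_depth then acc ++ [p.1] else acc) []
  else used_rules

-- ===== PORT B =====
-- the single pass of Source B: state = (used, best, best_rules), iterated over the zipped pairs
def bLoop (cd md : Int) :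
    List (Int × Int) → List Int → Option Int → List Int → List Int × Option Int × List Int
  | [], used, best, best_rules => (used, best, best_rules)
  | (r, d) :: ps, used, none, _ =>
    bLoop cd md ps (if cd + d ≤ md then used ++ [r] else used) (some d) [r]
  | (r, d) :: ps, used, some b, best_rules =>
    let used' := if cd + d ≤ md then used ++ [r] else used
    if d < b then bLoop cd md ps used' (some d) [r]
    else if d = b then bLoop cd md ps used' (some b) (best_rules ++ [r])
    else bLoop cd md ps used' (some b) best_rules

def filter_rules_for_grow_py_alt (nt : String) (rules : List Int) (current_depth : Int) (max_depth : Int) (min_depths : List (String × List Int)) : List Int :=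
  let depths := (pvLookupDepths min_depths nt).getD []
  let st := bLoop current_depth max_depth (rules.zip depths) [] none []
  if st.1 ≠ [] then st.1 else st.2.2

-- ===== PRECONDITION & SPEC =====
-- Pre_ excludes exactly the inputs where the Python A raises: a missing key nt (KeyError) and an
-- empty depth list for nt (then used_rules is empty and min([]) raises ValueError).
def Pre_filter_rules_for_grow_py (nt : String) (rules : List Int) (current_depth : Int) (max_depth : Int) (min_depths : List (String × List Int)) : Prop :=
  (pvLookupDepths min_depths nt).getD [] ≠ []
instance (nt : String) (rules : List Int) (current_depth : Int) (max_depth : Int) (min_depths : List (String × List Int)) : Decidable (Pre_filter_rules_for_grow_py nt rules current_depth max_depth min_depths) := by unfold Pre_filter_rules_for_grow_py; infer_instance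

def pvWitness_filter_rules_for_grow_py : String × List Int × Int × Int × (List (String × List Int)) :=
  ("S", [0, 1, 2], 1, 2, [("S", [1, 3, 1])])

-- When the depth list is longer than the rule list, no rule fits the depth budget, and the overall
-- minimum depth occurs only past the zip truncation, A returns [] (its fallback filters against a
-- minimum no paired rule attains) while B returns the rules with the smallest paired depth, which
-- is the intended nonempty fallback of "choose the rules sharing the lowest depth".
def D_filter_rules_for_grow_py (nt : String) (rules : List Int) (current_depth : Int) (max_depth : Int) (min_depths : List (String × List Int)) : Prop :=
  let depths := (pvLookupDepths min_depths nt).getD []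
  rules ≠ [] ∧ depths.length > rules.length ∧
  (∀ d ∈ depths.take rules.length, max_depth < current_depth + d) ∧
  (depths.min?.getD 0) < ((depths.take rules.length).min?.getD 0)
instance (nt : String) (rules : List Int) (current_depth : Int) (max_depth : Int) (min_depths : List (String × List Int)) : Decidable (D_filter_rules_for_grow_py nt rules current_depth max_depth min_depths) := by unfold D_filter_rules_for_grow_py; infer_instance

def Spec_filter_rules_for_grow_py (nt : String) (rules : List Int) (current_depth : Int) (max_depth : Int) (min_depths : List (String × List Int)) (out : List Int) : Prop := ¬ D_filter_rules_for_grow_py nt rules current_depth max_depth min_depths → out = filter_rules_for_grow_py_alt nt rules current_depth max_depth min_depths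
instance (nt : String) (rules : List Int) (current_depth : Int) (max_depth : Int) (min_depths : List (String × List Int)) (out : List Int) : Decidable (Spec_filter_rules_for_grow_py nt rules current_depth max_depth min_depths out) := by unfold Spec_filter_rules_for_grow_py; infer_instance

def pvDiffWitness_filter_rules_for_grow_py : String × List Int × Int × Int × (List (String × List Int)) :=
  ("S", [5], 0, 0, [("S", [2, 1])])
def pvDiffWitnessOut_filter_rules_for_grow_py : (List Int) × (List Int) := ([], [5])

-- ===== CLAIM (what is proved, stated in full; the proofs are below) =====
def Claim_unchanged_filter_rules_for_grow_py : Prop := ∀ (nt : String) (rules : List Int) (current_depth : Int) (max_depth : Int) (min_depths : List (String × List Int)), Dom_filter_rules_for_grow_py nt rules current_depth max_depth min_depths → Pre_filter_rules_for_grow_py nt rules current_depth max_depth min_depths → Spec_filter_rules_for_grow_py nt rules current_depth max_depth min_depths (filter_rules_for_grow_py nt rules current_depth max_depth min_depths)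
def Claim_changed_filter_rules_for_grow_py : Prop := Dom_filter_rules_for_grow_py (pvDiffWitness_filter_rules_for_grow_py.1) (pvDiffWitness_filter_rules_for_grow_py.2.1) (pvDiffWitness_filter_rules_for_grow_py.2.2.1) (pvDiffWitness_filter_rules_for_grow_py.2.2.2.1) (pvDiffWitness_filter_rules_for_grow_py.2.2.2.2) ∧ Pre_filter_rules_for_grow_py (pvDiffWitness_filter_rules_for_grow_py.1) (pvDiffWitness_filter_rules_for_grow_py.2.1) (pvDiffWitness_filter_rules_for_grow_py.2.2.1) (pvDiffWitness_filter_rules_for_grow_py.2.2.2.1) (pvDiffWitness_filter_rules_for_grow_py.2.2.2.2) ∧ D_filter_rules_for_grow_py (pvDiffWitness_filter_rules_for_grow_py.1) (pvDiffWitness_filter_rules_for_grow_py.2.1) (pvDiffWitness_filter_rules_for_grow_py.2.2.1) (pvDiffWitness_filter_rules_for_grow_py.2.2.2.1) (pvDiffWitness_filter_rules_for_grow_py.2.2.2.2) ∧ filter_rules_for_grow_py (pvDiffWitness_filter_rules_for_grow_py.1) (pvDiffWitness_filter_rules_for_grow_py.2.1) (pvDiffWitness_filter_rules_for_grow_py.2.2.1)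 (pvDiffWitness_filter_rules_for_grow_py.2.2.2.1) (pvDiffWitness_filter_rules_for_grow_py.2.2.2.2) = pvDiffWitnessOut_filter_rules_for_grow_py.1 ∧ filter_rules_for_grow_py_alt (pvDiffWitness_filter_rules_for_grow_py.1) (pvDiffWitness_filter_rules_for_grow_py.2.1) (pvDiffWitness_filter_rules_for_grow_py.2.2.1) (pvDiffWitness_filter_rules_for_grow_py.2.2.2.1) (pvDiffWitness_filter_rules_for_grow_py.2.2.2.2) = pvDiffWitnessOut_filter_rules_for_grow_py.2 ∧ pvDiffWitnessOut_filter_rules_for_grow_py.1 ≠ pvDiffWitnessOut_filter_rules_for_grow_py.2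
def Claim_exact_filter_rules_for_grow_py : Prop := ∀ (nt : String) (rules : List Int) (current_depth : Int) (max_depth : Int) (min_depths : List (String × List Int)), Dom_filter_rules_for_grow_py nt rules current_depth max_depth min_depths → Pre_filter_rules_for_grow_py nt rules current_depth max_depth min_depths → D_filter_rules_for_grow_py nt rules current_depth max_depth min_depths → filter_rules_for_grow_py nt rules current_depth max_depth min_depths ≠ filter_rules_for_grow_py_alt nt rules current_depth max_depth min_depths

-- ===== LEMMAS AND PROOFS =====

-- running minimum, as bLoop maintains it
def mergeMin (b : Option Int) (ds : List Int) : Option Int :=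
  ds.foldl (fun b s => some (min s (b.getD s))) b

theorem mergeMin_cons (b : Option Int) (s : Int) (ds : List Int) :
    mergeMin b (s :: ds) = mergeMin (some (min s (b.getD s))) ds := rfl

theorem mergeMin_some_le (c : Int) (ds : List Int) :
    ∃ M, mergeMin (some c) ds = some M ∧ M ≤ c := by
  induction ds generalizing c with
  | nil => exact ⟨c, rfl, le_refl c⟩
  | cons s ds ih =>
    obtain ⟨M, hM, hle⟩ := ih (min s c)
    exact ⟨M, hM, le_trans hle (min_le_right _ _)⟩

theorem mergeMin_foldl (c : Int) (t : List Int) :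
    mergeMin (some c) t = some (t.foldl min c) := by
  induction t generalizing c with
  | nil => rfl
  | cons s t ih =>
    rw [mergeMin_cons]
    simp only [Option.getD_some]
    rw [ih, List.foldl_cons, min_comm s c]

-- the full characterisation of bLoop
theorem bLoop_spec (cd md : Int) (ps : List (Int × Int)) (used : List Int) (b : Option Int) (br : List Int) :
    bLoop cd md ps used b br =
      ( used ++ (ps.filter (fun p => decide (cd + p.2 ≤ md))).map Prod.fst,
        mergeMin b (ps.map Prod.snd),
        match mergeMin b (ps.map Prod.snd) with
        | none => br
        | some M => (if b = some M then br else []) ++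
            (ps.filter (fun p => decide (p.2 = M))).map Prod.fst ) := by
  induction ps generalizing used b br with
  | nil =>
    simp only [bLoop, List.filter_nil, List.map_nil, List.append_nil, mergeMin, List.foldl_nil]
    cases b <;> simp
  | cons p ps ih =>
    obtain ⟨r, d⟩ := p
    cases b with
    | none =>
      simp only [bLoop, List.filter_cons, List.map_cons, decide_eq_true_eq]
      rw [ih, mergeMin_cons]
      simp only [Option.getD_none]
      rw [min_self]
      obtain ⟨M, hM, hle⟩ := mergeMin_some_le d (ps.map Prod.snd)
      refine congrArg₂ _ ?_ ?_
      · by_cases hc : cd + d ≤ md <;> simp [hc]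
      · rw [hM]
        by_cases hdM : d = M
        · subst hdM; simp [hM]
        · simp [hM, hdM]
    | some b0 =>
      simp only [bLoop, List.filter_cons, List.map_cons, decide_eq_true_eq]
      by_cases hlt : d < b0
      · rw [if_pos hlt, ih, mergeMin_cons]
        simp only [Option.getD_some]
        rw [min_eq_left (le_of_lt hlt)]
        obtain ⟨M, hM, hle⟩ := mergeMin_some_le d (ps.map Prod.snd)
        have hne : b0 ≠ M := by omega
        refine congrArg₂ _ ?_ ?_
        · by_cases hc : cd + d ≤ md <;> simp [hc]
        · rw [hM]
          by_cases hdM : d = M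
          · subst hdM; simp [hM, hne]
          · simp [hM, hdM, hne]
      · rw [if_neg hlt]
        have hmin : min d b0 = b0 := min_eq_right (by omega)
        by_cases hdb : d = b0
        · rw [if_pos hdb, ih, mergeMin_cons]
          simp only [Option.getD_some]
          rw [hmin]
          obtain ⟨M, hM, hle⟩ := mergeMin_some_le b0 (ps.map Prod.snd)
          refine congrArg₂ _ ?_ ?_
          · by_cases hc : cd + d ≤ md <;> simp [hc]
          · rw [hM]
            subst hdb
            by_cases hbM : d = M
            · subst hbM; simp [hM]
            · simp [hM, hbM]
        · rw [if_neg hdb, ih, mergeMin_cons]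
          simp only [Option.getD_some]
          rw [hmin]
          obtain ⟨M, hM, hle⟩ := mergeMin_some_le b0 (ps.map Prod.snd)
          have hdM : d ≠ M := by omega
          refine congrArg₂ _ ?_ ?_
          · by_cases hc : cd + d ≤ md <;> simp [hc]
          · rw [hM]
            by_cases hbM : b0 = M
            · subst hbM; simp [hM, hdM]
            · simp [hM, hbM, hdM]

-- A's loops rewritten as filters
theorem filterA (cd md : Int) (l : List (Int × Int)) (acc : List Int) :
    l.foldl (fun acc p => if cd + p.2 ≤ md then acc ++ [p.1] else acc) acc =
      acc ++ (l.filter (fun p => decide (cd + p.2 ≤ md))).map Prod.fst := by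
  induction l generalizing acc with
  | nil => simp
  | cons x l ih => by_cases h : cd + x.2 ≤ md <;> simp [List.foldl, h, ih]

theorem filterEq (m : Int) (l : List (Int × Int)) (acc : List Int) :
    l.foldl (fun acc p => if p.2 = m then acc ++ [p.1] else acc) acc =
      acc ++ (l.filter (fun p => decide (p.2 = m))).map Prod.fst := by
  induction l generalizing acc with
  | nil => simp
  | cons x l ih => by_cases h : x.2 = m <;> simp [List.foldl, h, ih]

-- min? agrees with mergeMin on nonempty lists
theorem min?_eq_mergeMin (ds : List Int) (hne : ds ≠ []) :
    PySem.List.min? ds (fun x => x) = mergeMin none ds := by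
  cases ds with
  | nil => exact absurd rfl hne
  | cons x t =>
    rw [PySem.List.min?_id_cons, mergeMin_cons, mergeMin_foldl]
    simp

-- snd of a zip is a take of the second list
theorem map_snd_zip_take (l1 : List Int) (l2 : List Int) :
    (l1.zip l2).map Prod.snd = l2.take l1.length := by
  induction l1 generalizing l2 with
  | nil => simp
  | cons x l1 ih => cases l2 <;> simp [ih]

-- foldl min never exceeds its seed
theorem foldl_min_le_init (t : List Int) (x : Int) : t.foldl min x ≤ x := by
  induction t generalizing x with
  | nil => exact le_refl x
  | cons s t ih => exact le_trans (ih (min x s)) (min_le_left x s)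

-- the minimum over a prefix is at least the minimum over the full list
theorem foldl_min_take_le (t : List Int) (x : Int) (j : Nat) :
    t.foldl min x ≤ (t.take j).foldl min x := by
  induction t generalizing x j with
  | nil => simp
  | cons s t ih =>
    cases j with
    | zero => simpa using le_trans (foldl_min_le_init t (min x s)) (min_le_left x s)
    | succ j => simpa using ih (min x s) j

-- foldl min is attained by the seed or an element
theorem foldl_min_attained (t : List Int) (x : Int) :
    t.foldl min x = x ∨ t.foldl min x ∈ t := by
  induction t generalizing x with
  | nil => exact Or.inl rfl
  | cons s t ih =>
    rcases ih (min x s) with h | h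
    · rcases le_total x s with hxs | hxs
      · left; rw [List.foldl_cons, h, min_eq_left hxs]
      · right; rw [List.foldl_cons, h, min_eq_right hxs]; exact List.mem_cons_self
    · right; exact List.mem_cons_of_mem s h

-- foldl min is below every element
theorem foldl_min_le_mem (t : List Int) (x d : Int) (hd : d ∈ t) : t.foldl min x ≤ d := by
  induction t generalizing x with
  | nil => cases hd
  | cons s t ih =>
    rcases List.mem_cons.mp hd with rfl | hd'
    · exact le_trans (foldl_min_le_init t (min x d)) (min_le_right x d)
    · exact ih (min x s) hd'

-- ===== VERDICT (by name: the statement is the Claim_ definition above) =====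
theorem filter_rules_for_grow_py_spec : Claim_unchanged_filter_rules_for_grow_py := by
  intro nt rules cd md mdep _ hpre hnD
  unfold Pre_filter_rules_for_grow_py at hpre
  unfold D_filter_rules_for_grow_py at hnD
  unfold filter_rules_for_grow_py filter_rules_for_grow_py_alt
  simp only []
  set depths := (pvLookupDepths mdep nt).getD [] with hdep
  rw [bLoop_spec, filterA]
  simp only [List.nil_append]
  set used := ((rules.zip depths).filter (fun p => decide (cd + p.2 ≤ md))).map Prod.fst with hused
  by_cases hu : used = []
  · rw [if_pos hu, if_neg (by simpa using hu)]
    -- all zipped pairs are unfit (otherwise used would be nonempty)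
    have hunfit : ∀ d ∈ depths.take rules.length, md < cd + d := by
      intro d hd
      rw [← map_snd_zip_take rules depths] at hd
      obtain ⟨p, hp, hpd⟩ := List.mem_map.mp hd
      by_contra hnot
      have : p.1 ∈ used := by
        rw [hused]
        exact List.mem_map.mpr ⟨p, List.mem_filter.mpr ⟨hp, by simpa [hpd] using hnot⟩, rfl⟩
      simp [hu] at this
    cases hds : depths with
    | nil => exact absurd hds hpre
    | cons x t =>
      rw [filterEq, min?_eq_mergeMin (x :: t) (by simp), mergeMin_cons]
      simp only [Option.getD_none, min_self]
      rw [mergeMin_foldl]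
      simp only [Option.getD_some, List.nil_append]
      rw [map_snd_zip_take]
      cases hr : rules with
      | nil => rfl
      | cons r0 rs =>
        have htake : (x :: t).take (r0 :: rs).length = x :: t.take rs.length := by
          simp [List.take]
        rw [htake, mergeMin_cons]
        simp only [Option.getD_none, min_self]
        rw [mergeMin_foldl]
        simp only [List.nil_append]
        -- the minimum over the prefix equals the minimum over the full list
        have hle := foldl_min_take_le t x rs.length
        have heq2 : t.foldl min x = (t.take rs.length).foldl min x := by
          by_cases hlc : t.length ≤ rs.length
          · rw [List.take_of_length_le hlc]
          · refine le_antisymm hle ?_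
            by_contra hgt
            have hlt : t.foldl min x < (t.take rs.length).foldl min x := by omega
            refine hnD ⟨by rw [hr]; simp, ?_, hunfit, ?_⟩
            · rw [hds, hr]; simp; omega
            · rw [hds, hr, htake]
              simp only [List.min?, Option.getD_some]
              exact hlt
        rw [heq2]
        simp
        try rfl
  · rw [if_neg hu, if_pos (by simpa using hu)]

theorem filter_rules_for_grow_py_changed : Claim_changed_filter_rules_for_grow_py := by
  unfold Claim_changed_filter_rules_for_grow_py; decide

theorem filter_rules_for_grow_py_tight : Claim_exact_filter_rules_for_grow_py := by
  intro nt rules cd md mdep _ hpre hD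
  unfold Pre_filter_rules_for_grow_py at hpre
  unfold D_filter_rules_for_grow_py at hD
  unfold filter_rules_for_grow_py filter_rules_for_grow_py_alt
  simp only []
  set depths := (pvLookupDepths mdep nt).getD [] with hdep
  obtain ⟨hrne, hlen, hunfit, hmin⟩ := hD
  rw [bLoop_spec, filterA]
  simp only [List.nil_append]
  -- used is empty: every zipped pair is unfit
  have hu : ((rules.zip depths).filter (fun p => decide (cd + p.2 ≤ md))).map Prod.fst = [] := by
    rw [List.map_eq_nil_iff, List.filter_eq_nil_iff]
    intro p hp
    have hd : p.2 ∈ depths.take rules.length := by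
      rw [← map_snd_zip_take rules depths]
      exact List.mem_map.mpr ⟨p, hp, rfl⟩
    simpa using not_le.mpr (hunfit p.2 hd)
  rw [hu, if_pos rfl, if_neg (by simp)]
  cases hds : depths with
  | nil => exact absurd hds hpre
  | cons x t =>
    cases hr : rules with
    | nil => exact absurd hr hrne
    | cons r0 rs =>
      have htake : (x :: t).take (r0 :: rs).length = x :: t.take rs.length := by
        simp [List.take]
      rw [filterEq, min?_eq_mergeMin (x :: t) (by simp), mergeMin_cons]
      simp only [Option.getD_none, min_self]
      rw [mergeMin_foldl]
      simp only [Option.getD_some, List.nil_append]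
      rw [map_snd_zip_take, htake, mergeMin_cons]
      simp only [Option.getD_none, min_self]
      rw [mergeMin_foldl]
      simp only [List.nil_append]
      rw [hds, hr, htake] at hmin
      simp only [List.min?, Option.getD_some] at hmin
      set mF := t.foldl min x with hmF
      set mP := (t.take rs.length).foldl min x with hmP
      -- A's fallback is empty: every zipped depth is ≥ mP > mF
      have hA : (((r0 :: rs).zip (x :: t)).filter (fun p => decide (p.2 = mF))).map Prod.fst = [] := by
        rw [List.map_eq_nil_iff, List.filter_eq_nil_iff]
        intro p hp
        have hd : p.2 ∈ x :: t.take rs.length := by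
          rw [← htake, ← map_snd_zip_take (r0 :: rs) (x :: t)]
          exact List.mem_map.mpr ⟨p, hp, rfl⟩
        have hge : mP ≤ p.2 := by
          rcases List.mem_cons.mp hd with h1 | h2
          · exact h1 ▸ le_trans (foldl_min_le_init _ _) (by simp)
          · exact foldl_min_le_mem _ _ _ h2
        simp only [decide_eq_true_eq]
        omega
      -- B's fallback is nonempty: mP is attained by some zipped pair
      have hmem : mP ∈ x :: t.take rs.length := by
        rcases foldl_min_attained (t.take rs.length) x with h | h
        · rw [hmP, h]; exact List.mem_cons_self
        · exact List.mem_cons_of_mem x h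
      have hmem' : mP ∈ ((r0 :: rs).zip (x :: t)).map Prod.snd := by
        rwa [map_snd_zip_take (r0 :: rs) (x :: t), htake]
      obtain ⟨p, hp, hpd⟩ := List.mem_map.mp hmem'
      have hB : (((r0 :: rs).zip (x :: t)).filter (fun p => decide (p.2 = mP))).map Prod.fst ≠ [] := by
        intro hnil
        rw [List.map_eq_nil_iff, List.filter_eq_nil_iff] at hnil
        exact absurd (by simpa using hpd) (by simpa using hnil p hp)
      intro hcontra
      simp only [reduceCtorEq, if_neg, List.nil_append] at hcontra
      exact hB (hcontra.symm.trans hA)
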